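-- pv_equiv track=rewrite | github.com/jacixn/INKAMI | apps/server/app/services/vision.py | _segment_vertical_ranges
-- ===== SOURCE A (Python) =====
-- def _segment_vertical_ranges(
--     height: int, max_height: int = 1500, overlap: int = 1000
-- ) -> list[tuple[int, int]]:
--     """Split tall/scrolling pages into overlapping slices for better OCR.
--
--     Very large overlap (1000px) ensures stacked bubbles near slice boundaries
--     appear fully in at least one slice. Smaller max_height (1500px) keeps text
--     larger and makes bubbles more likely to be fully contained in one segment.
--     """
--     if height <= max_height:
--         return [(0, height)]
--
--     # Ensure overlap doesn't exceed half the max height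
--     overlap = min(overlap, max_height // 2)
--     step = max(400, max_height - overlap)
--
--     ranges: list[tuple[int, int]] = []
--     start = 0
--     while start < height:
--         end = min(height, start + max_height)
--         ranges.append((start, end))
--         if end >= height:
--             break
--         start = max(0, end - overlap)
--     return ranges
-- ===== SOURCE B (Python) =====
-- def _segment_vertical_ranges(height, max_height=1500, overlap=1000):
--     """Closed-form version: compute the segment count by ceiling division and
--     build the list directly, instead of a while-loop with a break."""
--     if height <= max_height:
--         return [(0, height)]
--     overlap = min(overlap, max_height // 2)
--     inc = max_height - overlap
--     # first index whose segment reaches the bottom: n = ceil((height - max_height) / inc)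
--     n = -((max_height - height) // inc)
--     # last index whose start is still above the bottom: ceil(height / inc) - 1
--     last = -((-height) // inc) - 1
--     m = min(n, last)
--     return [(i * inc, min(height, i * inc + max_height)) for i in range(m + 1)]
-- ===== Notes on version B (the rewrite author's own statement) =====
-- stated objective: alternative
-- what changed: Replaces A's while-loop with break (advancing start = end - overlap) by a closed-form construction: the segment count is computed with two ceiling divisions and the list is built directly as a map over range.
-- outside the precondition, e.g. on _segment_vertical_ranges(-6, -10, 0): A returns [], B returns [(0, -10)]
import Mathlib
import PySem

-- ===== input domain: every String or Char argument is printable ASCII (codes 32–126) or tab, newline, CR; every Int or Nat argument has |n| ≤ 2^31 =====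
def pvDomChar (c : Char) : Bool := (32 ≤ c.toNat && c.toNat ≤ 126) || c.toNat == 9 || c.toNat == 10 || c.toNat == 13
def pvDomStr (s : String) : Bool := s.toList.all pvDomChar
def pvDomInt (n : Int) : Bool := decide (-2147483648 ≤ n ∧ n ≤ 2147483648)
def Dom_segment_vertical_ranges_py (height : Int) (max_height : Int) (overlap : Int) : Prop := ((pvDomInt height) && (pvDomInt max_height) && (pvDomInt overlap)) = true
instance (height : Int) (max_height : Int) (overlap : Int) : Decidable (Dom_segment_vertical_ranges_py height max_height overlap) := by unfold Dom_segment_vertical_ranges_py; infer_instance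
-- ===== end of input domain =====

-- B replaces A's while/break loop by a closed-form segment count (two ceiling
-- divisions) and a direct range-map construction (objective: alternative).

-- ===== PORT A =====
-- the while-loop of A, fuel-guarded for totality only (the loop diverges
-- outside Pre_; inside Pre_ the fuel given below is never exhausted)
def segALoop (height : Int) (max_height : Int) (overlap : Int) : Nat → Int → List (Int × Int)
  | 0, _ => []
  | fuel+1, start =>
    if start < height then
      let e := min height (start + max_height)
      if height ≤ e then [(start, e)]
      else (start, e) :: segALoop height max_height overlap fuel (max 0 (e - overlap))
    else []

def segment_vertical_ranges_py (height : Int) (max_height : Int) (overlap : Int) : List (Int × Int) :=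
  if height ≤ max_height then [(0, height)]
  else
    let ov := min overlap (PySem.Int.floordiv max_height 2)
    let _step := max 400 (max_height - ov)   -- A computes `step` but never uses it
    segALoop height max_height ov (height.toNat + 1) 0

-- ===== PORT B =====
def segment_vertical_ranges_py_alt (height : Int) (max_height : Int) (overlap : Int) : List (Int × Int) :=
  if height ≤ max_height then [(0, height)]
  else
    let ov := min overlap (PySem.Int.floordiv max_height 2)
    let inc := max_height - ov
    let n := -(PySem.Int.floordiv (max_height - height) inc)
    let last := -(PySem.Int.floordiv (-height) inc) - 1
    let m := min n last
    (PySem.List.pyRange 0 (m+1) 1).map (fun i => (i * inc, min height (i * inc + max_height)))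

-- ===== PRECONDITION & SPEC =====
-- Pre_ excludes inputs where the clamped advance max_height - min(overlap, max_height//2)
-- is non-positive while height > max_height: A then loops forever for positive heights
-- and returns [] from a never-entered loop for non-positive heights, while B's
-- closed-form division raises (advance 0) or yields a covering segment there.
def Pre_segment_vertical_ranges_py (height : Int) (max_height : Int) (overlap : Int) : Prop :=
  height ≤ max_height ∨ 0 < max_height - min overlap (PySem.Int.floordiv max_height 2)
instance (height : Int) (max_height : Int) (overlap : Int) : Decidable (Pre_segment_vertical_ranges_py height max_height overlap) := by unfold Pre_segment_vertical_ranges_py; infer_instance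

def pvWitness_segment_vertical_ranges_py : Int × Int × Int := (4000, 1500, 1000)

def Spec_segment_vertical_ranges_py (height : Int) (max_height : Int) (overlap : Int) (out : List (Int × Int)) : Prop := out = segment_vertical_ranges_py_alt height max_height overlap
instance (height : Int) (max_height : Int) (overlap : Int) (out : List (Int × Int)) : Decidable (Spec_segment_vertical_ranges_py height max_height overlap out) := by unfold Spec_segment_vertical_ranges_py; infer_instance

-- ===== CLAIM (what is proved, stated in full; the proofs are below) =====
def Claim_equal_segment_vertical_ranges_py : Prop := ∀ (height : Int) (max_height : Int) (overlap : Int), Dom_segment_vertical_ranges_py height max_height overlap → Pre_segment_vertical_ranges_py height max_height overlap → Spec_segment_vertical_ranges_py height max_height overlap (segment_vertical_ranges_py height max_height overlap)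

-- ===== LEMMAS AND PROOFS =====

lemma segALoop_nil (h mh ov : Int) (fuel : Nat) (s : Int) (hs : ¬ s < h) :
    segALoop h mh ov fuel s = [] := by
  cases fuel with
  | zero => rfl
  | succ f => simp [segALoop, hs]

-- A's loop, started at the i-th start position, emits exactly segments i..m.
lemma segALoop_closed (h mh ov inc n last m : Int)
    (hinc : inc = mh - ov) (hpos : 0 < inc)
    (hn1 : (n - 1) * inc < h - mh) (hn2 : h - mh ≤ n * inc)
    (hl1 : last * inc < h) (hl2 : h ≤ (last + 1) * inc)
    (hm : m = min n last) :
    ∀ (fuel : Nat) (i : Int), 0 ≤ i → i ≤ m → (m - i).toNat < fuel →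
      segALoop h mh ov fuel (i * inc) =
        (PySem.List.pyRange i (m + 1) 1).map (fun j => (j * inc, min h (j * inc + mh))) := by
  intro fuel
  induction fuel with
  | zero => intro i _ _ hf; omega
  | succ f ih =>
    intro i hi0 him hf
    have hil : i ≤ last := by omega
    have hstart : i * inc < h :=
      lt_of_le_of_lt (mul_le_mul_of_nonneg_right hil (le_of_lt hpos)) hl1
    by_cases hbreak : h ≤ i * inc + mh
    · -- final segment: i = n = m, the loop breaks
      have hni : n ≤ i := by
        by_contra hc
        have h2 : i * inc ≤ (n - 1) * inc :=
          mul_le_mul_of_nonneg_right (by omega) (le_of_lt hpos)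
        linarith
      have hieq : i = m := by omega
      have hcond : h ≤ min h (i * inc + mh) := le_min (le_refl h) hbreak
      simp only [segALoop, if_pos hstart, if_pos hcond]
      rw [hieq, PySem.List.pyRange_one_singleton]
      simp
    · push_neg at hbreak
      have hin : i < n := by
        by_contra hc
        push_neg at hc
        have h2 : n * inc ≤ i * inc := mul_le_mul_of_nonneg_right hc (le_of_lt hpos)
        linarith
      have hmin : min h (i * inc + mh) = i * inc + mh := min_eq_right (le_of_lt hbreak)
      have hnext : max 0 (i * inc + mh - ov) = (i + 1) * inc := by
        have he : i * inc + mh - ov = (i + 1) * inc := by rw [hinc]; ring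
        rw [he]
        exact max_eq_right (by positivity)
      have hnobreak : ¬ h ≤ min h (i * inc + mh) := by
        rw [hmin]; exact not_le.mpr hbreak
      by_cases hend : i = m
      · -- here m = last (since i < n): the next start is past the page, loop exits
        have hml : m = last := by omega
        have hge : ¬ (i + 1) * inc < h := by
          rw [hend, hml]; exact not_lt.mpr hl2
        simp only [segALoop, if_pos hstart, if_neg hnobreak]
        rw [hmin, hnext, segALoop_nil h mh ov f _ hge]
        rw [hend, PySem.List.pyRange_one_singleton]
        simp [min_eq_right (le_of_lt (hend ▸ hbreak))]

      · have him' : i + 1 ≤ m := by omega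
        simp only [segALoop, if_pos hstart, if_neg hnobreak]
        rw [hmin, hnext, ih (i + 1) (by omega) him' (by omega)]
        rw [PySem.List.pyRange_one_cons (by omega : i < m + 1)]
        simp [hmin]

theorem segment_vertical_ranges_py_spec : Claim_equal_segment_vertical_ranges_py := by
  intro h mh ov _ hpre
  unfold Spec_segment_vertical_ranges_py segment_vertical_ranges_py segment_vertical_ranges_py_alt
  by_cases hsmall : h ≤ mh
  · simp [hsmall]
  · have htall : mh < h := lt_of_not_ge hsmall
    have hinc : 0 < mh - min ov (PySem.Int.floordiv mh 2) := by
      rcases hpre with hp | hp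
      · exact absurd hp hsmall
      · exact hp
    simp only [if_neg hsmall]
    set ov' := min ov (PySem.Int.floordiv mh 2) with hov'
    set inc := mh - ov' with hincdef
    set n := -(PySem.Int.floordiv (mh - h) inc) with hn
    set last := -(PySem.Int.floordiv (-h) inc) - 1 with hlast
    set m := min n last with hm
    have hnb : (n - 1) * inc < h - mh ∧ h - mh ≤ n * inc := by
      have he : mh - h = -(h - mh) := by ring
      rw [hn, he]
      exact (PySem.Int.neg_floordiv_neg_eq_iff_of_pos hinc).mp rfl
    have hlb : (last + 1 - 1) * inc < h ∧ h ≤ (last + 1) * inc := by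
      have he : last + 1 = -(PySem.Int.floordiv (-h) inc) := by rw [hlast]; ring
      rw [he]
      exact (PySem.Int.neg_floordiv_neg_eq_iff_of_pos hinc).mp rfl
    have hl1 : last * inc < h := by
      have := hlb.1; linarith [this, (by ring : (last + 1 - 1) * inc = last * inc)]
    by_cases hpos : 0 < h
    · have hn1 : 1 ≤ n := by nlinarith [hnb.2]
      have hl0 : 0 ≤ last := by nlinarith [hlb.2]
      have hmh : m < h := by
        have h1 : last ≤ last * inc := by nlinarith
        have h2 : m ≤ last := min_le_right _ _
        linarith
      have key := segALoop_closed h mh ov' inc n last m rfl hinc hnb.1 hnb.2 hl1 hlb.2 rfl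
        (h.toNat + 1) 0 (le_refl 0) (by omega) (by omega)
      simpa using key
    · push_neg at hpos
      have hlneg : last < 0 := by nlinarith
      have hmneg : m + 1 ≤ 0 := by
        have h2 : m ≤ last := min_le_right _ _
        omega
      rw [segALoop_nil h mh ov' _ 0 (by omega)]
      rw [PySem.List.pyRange_one_eq_nil hmneg]
      simp
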